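-- pv_equiv track=rewrite | github.com/TimDouglas28/visinfo_review | src/infstat.py | get_demo_small
-- ===== SOURCE A (Python) =====
-- def get_demo_small( lines ):
--     """
--     Retrieve essential demographics info used in the statistics
--     """
--     gender          = "unspec"
--     race            = "unspec"
--     edu             = "unspec"
--     age             = "unspec"
--     politic         = "unspec"
--
--     for l in lines:
--         if "party" in l:
--             politic     = l.lower().split()[ -1 ]
--         if "sex" in l:
--             if "male" in l:
--                 gender  = 'M'
--             if "female" in l:
--                 gender  = 'F'
--         if "race" in l:
--             race        = l.lower().split()[ -1 ]
--         if "age" in l: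
--             age         = l.lower().split()[ -1 ]
--
--     return gender, race, edu, age, politic
-- ===== SOURCE B (Python) =====
-- def get_demo_small(lines):
--     """
--     Retrieve essential demographics info used in the statistics
--     (per-field reversed search: first match in reversed order = last-wins)
--     """
--     def last_of(kw):
--         return next((l.lower().split()[-1] for l in reversed(lines) if kw in l),
--                     "unspec")
--
--     gender = next(('F' if "female" in l else 'M'
--                    for l in reversed(lines)
--                    if "sex" in l and ("male" in l or "female" in l)),
--                   "unspec")
--
--     return gender, last_of("race"), "unspec", last_of("age"), last_of("party")
-- ===== Notes on version B (the rewrite author's own statement) =====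
-- stated objective: idiomatic
-- what changed: Replaces the single stateful loop that overwrites five accumulator variables with independent per-field searches over reversed(lines) using next(...), so each field is computed on its own (first match in reversed order reproduces last-line-wins).
import Mathlib
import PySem

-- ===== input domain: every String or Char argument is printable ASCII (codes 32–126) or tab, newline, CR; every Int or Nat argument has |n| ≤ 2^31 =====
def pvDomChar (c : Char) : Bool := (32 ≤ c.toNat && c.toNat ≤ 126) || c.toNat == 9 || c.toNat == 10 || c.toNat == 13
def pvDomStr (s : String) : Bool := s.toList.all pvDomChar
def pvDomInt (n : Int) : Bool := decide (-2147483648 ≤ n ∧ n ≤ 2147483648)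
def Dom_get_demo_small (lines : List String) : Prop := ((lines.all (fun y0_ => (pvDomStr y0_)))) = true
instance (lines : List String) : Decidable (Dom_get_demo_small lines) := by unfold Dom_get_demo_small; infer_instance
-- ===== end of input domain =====

-- B replaces A's single stateful accumulator loop with an independent reversed search per field (idiomatic; same cost).

-- ===== PORT A =====
-- l.lower().split()[-1]; the IndexError case (pyGet? = none) is unreachable where it is called,
-- since the line then contains the non-whitespace keyword, so split() is nonempty.
def pvLastWordA (l : String) : String :=
  (PySem.List.pyGet? (PySem.Str.split₀ (PySem.Str.lower l)) (-1)).getD "unspec"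

def pvStepA (st : String × String × String × String × String) (l : String) :
    String × String × String × String × String :=
  let (gender, race, edu, age, politic) := st
  let politic := if PySem.Str.isIn "party" l then pvLastWordA l else politic
  let gender :=
    if PySem.Str.isIn "sex" l then
      let g := if PySem.Str.isIn "male" l then "M" else gender
      if PySem.Str.isIn "female" l then "F" else g
    else gender
  let race := if PySem.Str.isIn "race" l then pvLastWordA l else race
  let age := if PySem.Str.isIn "age" l then pvLastWordA l else age
  (gender, race, edu, age, politic)

def get_demo_small (lines : List String) : String × String × String × String × String :=
  lines.foldl pvStepA ("unspec", "unspec", "unspec", "unspec", "unspec")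

-- ===== PORT B =====
-- l.lower().split()[-1]; unreachable IndexError as in A's helper (the matched line contains the keyword).
def pvLastWordB (l : String) : String :=
  (PySem.List.pyGet? (PySem.Str.split₀ (PySem.Str.lower l)) (-1)).getD "unspec"

-- next((l.lower().split()[-1] for l in reversed(lines) if kw in l), "unspec")
def pvLastOf (lines : List String) (kw : String) : String :=
  match lines.reverse.find? (fun l => PySem.Str.isIn kw l) with
  | some l => pvLastWordB l
  | none => "unspec"

def get_demo_small_alt (lines : List String) : String × String × String × String × String :=
  let gender :=
    match lines.reverse.find?
        (fun l => PySem.Str.isIn "sex" l &&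
          (PySem.Str.isIn "male" l || PySem.Str.isIn "female" l)) with
    | some l => if PySem.Str.isIn "female" l then "F" else "M"
    | none => "unspec"
  (gender, pvLastOf lines "race", "unspec", pvLastOf lines "age", pvLastOf lines "party")

-- ===== PRECONDITION & SPEC =====
def Spec_get_demo_small (lines : List String) (out : String × String × String × String × String) : Prop := out = get_demo_small_alt lines
instance (lines : List String) (out : String × String × String × String × String) : Decidable (Spec_get_demo_small lines out) := by unfold Spec_get_demo_small; infer_instance

-- ===== CLAIM (what is proved, stated in full; the proofs are below) =====
def Claim_equal_get_demo_small : Prop := ∀ (lines : List String), Dom_get_demo_small lines → Spec_get_demo_small lines (get_demo_small lines)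

-- ===== LEMMAS AND PROOFS =====
theorem pvLastWord_eq (l : String) : pvLastWordA l = pvLastWordB l := rfl

theorem pv_main (lines : List String) : get_demo_small lines = get_demo_small_alt lines := by
  induction lines using List.reverseRecOn with
  | nil => rfl
  | append_singleton xs x ih =>
    have hA : get_demo_small (xs ++ [x]) = pvStepA (get_demo_small xs) x := by
      simp [get_demo_small, List.foldl_append]
    rw [hA, ih]
    simp only [get_demo_small_alt, pvLastOf, pvStepA, List.reverse_append,
      List.reverse_singleton, List.singleton_append, List.find?_cons]
    cases hsex : PySem.Str.isIn "sex" x <;>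
    cases hm : PySem.Str.isIn "male" x <;>
    cases hf : PySem.Str.isIn "female" x <;>
    cases hr : PySem.Str.isIn "race" x <;>
    cases ha : PySem.Str.isIn "age" x <;>
    cases hp : PySem.Str.isIn "party" x <;>
      (simp [PySem.Str.isIn] at hsex hm hf hr ha hp <;>
       simp [PySem.Str.isIn, hsex, hm, hf, hr, ha, hp, pvLastWord_eq])

-- ===== VERDICT (by name: the statement is the Claim_ definition above) =====
theorem get_demo_small_spec : Claim_equal_get_demo_small := by
  intro lines _
  unfold Spec_get_demo_small
  exact pv_main lines
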